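-- pv_equiv track=rewrite | github.com/QQQQQQBY/MGDIL | code/remove_repeat_id.py | find_duplicate_ids_across_datasets
-- ===== SOURCE A (Python) =====
-- from typing import Dict, List, Tuple, Set
-- from collections import defaultdict
--
-- def find_duplicate_ids_across_datasets(dataset_ids: Dict[str, List[str]]) -> Dict[str, List[str]]:
--     """
--     找出跨数据集重复的ID
--
--     参数:
--         dataset_ids (dict): 数据集名称到ID列表的映射
--
--     返回:
--         dict: 重复ID到包含该ID的数据集列表的映射
--     """
--     id_to_datasets = defaultdict(list)
--
--     for dataset_name, ids in dataset_ids.items():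
--         for id_value in ids:
--             id_to_datasets[id_value].append(dataset_name)
--
--     # 筛选出被多个数据集包含的ID
--     duplicates = {
--         id_value: datasets
--         for id_value, datasets in id_to_datasets.items()
--         if len(datasets) > 1
--     }
--
--     return duplicates
-- ===== SOURCE B (Python) =====
-- from collections import Counter
--
-- def find_duplicate_ids_across_datasets(dataset_ids):
--     # Pass 1: total occurrence count of every id across all datasets.
--     counts = Counter()
--     for ids in dataset_ids.values():
--         counts.update(ids)
--     # Pass 2: rebuild, keeping only ids whose total count exceeds 1.
--     result = {}
--     for dataset_name, ids in dataset_ids.items():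
--         for id_value in ids:
--             if counts[id_value] > 1:
--                 result.setdefault(id_value, []).append(dataset_name)
--     return result
-- ===== Notes on version B (the rewrite author's own statement) =====
-- stated objective: alternative
-- what changed: Instead of accumulating an id->datasets map and then filtering entries by list length, B first builds a Counter of total id occurrences across all datasets and then re-traverses the input, appending dataset names only for ids whose total count exceeds 1.
import Mathlib
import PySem

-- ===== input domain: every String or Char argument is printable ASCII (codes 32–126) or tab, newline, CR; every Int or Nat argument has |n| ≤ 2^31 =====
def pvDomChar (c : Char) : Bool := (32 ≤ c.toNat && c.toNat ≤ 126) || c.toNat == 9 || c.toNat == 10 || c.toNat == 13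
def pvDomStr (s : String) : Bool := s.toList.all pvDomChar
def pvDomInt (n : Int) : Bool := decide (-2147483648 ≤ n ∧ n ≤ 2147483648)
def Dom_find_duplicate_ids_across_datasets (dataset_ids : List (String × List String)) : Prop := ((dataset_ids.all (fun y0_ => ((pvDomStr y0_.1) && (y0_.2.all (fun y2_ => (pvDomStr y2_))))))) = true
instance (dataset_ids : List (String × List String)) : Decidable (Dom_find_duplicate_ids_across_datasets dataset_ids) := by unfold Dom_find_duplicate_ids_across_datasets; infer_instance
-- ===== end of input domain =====

-- B replaces A's "accumulate id→datasets then filter by list length" with a count-first two-pass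
-- rebuild (Counter, then re-traverse appending only ids whose total count exceeds 1); objective: alternative decomposition.


-- ===== PORT A =====
-- id_to_datasets[id_value].append(dataset_name) on a defaultdict(list) = modify with default []
def find_duplicate_ids_across_datasets (dataset_ids : List (String × List String)) : List (String × List String) :=
  let id_to_datasets : PySem.Dict String (List String) :=
    dataset_ids.foldl (fun d p => p.2.foldl (fun d i => d.modify i [] (· ++ [p.1])) d) PySem.Dict.empty
  (id_to_datasets.items.filter (fun p => 1 < p.2.length))

-- ===== PORT B =====
-- counts.update(ids) adds 1 per occurrence; result.setdefault(i, []).append(n) = modify with default []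
def find_duplicate_ids_across_datasets_alt (dataset_ids : List (String × List String)) : List (String × List String) :=
  let counts : PySem.Dict String Int :=
    dataset_ids.foldl (fun c p => p.2.foldl (fun c i => c.modify i 0 (· + 1)) c) PySem.Dict.empty
  let result : PySem.Dict String (List String) :=
    dataset_ids.foldl
      (fun r p => p.2.foldl (fun r i => if 1 < counts.getD i 0 then r.modify i [] (· ++ [p.1]) else r) r)
      PySem.Dict.empty
  result.items

-- ===== PRECONDITION & SPEC =====
def Spec_find_duplicate_ids_across_datasets (dataset_ids : List (String × List String)) (out : List (String × List String)) : Prop := out = find_duplicate_ids_across_datasets_alt dataset_ids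
instance (dataset_ids : List (String × List String)) (out : List (String × List String)) : Decidable (Spec_find_duplicate_ids_across_datasets dataset_ids out) := by unfold Spec_find_duplicate_ids_across_datasets; infer_instance

-- ===== CLAIM (what is proved, stated in full; the proofs are below) =====
def Claim_equal_find_duplicate_ids_across_datasets : Prop := ∀ (dataset_ids : List (String × List String)), Dom_find_duplicate_ids_across_datasets dataset_ids → Spec_find_duplicate_ids_across_datasets dataset_ids (find_duplicate_ids_across_datasets dataset_ids)

-- ===== LEMMAS AND PROOFS =====

-- the stream of (id, dataset_name) occurrences both programs traverse, in order
def pvOccs (dataset_ids : List (String × List String)) : List (String × String) :=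
  dataset_ids.flatMap (fun p => p.2.map (fun i => (i, p.1)))

-- both nested loops are folds over the occurrence stream
theorem pv_foldl_nested {β : Type} (g : β → String × String → β) :
    ∀ (l : List (String × List String)) (init : β),
      l.foldl (fun acc p => p.2.foldl (fun acc i => g acc (i, p.1)) acc) init
        = (pvOccs l).foldl g init := by
  intro l
  induction l with
  | nil => intro init; rfl
  | cons p t ih =>
      intro init
      simp only [List.foldl_cons, pvOccs, List.flatMap_cons, List.foldl_append,
        List.foldl_map] at ih ⊢
      exact ih _

-- the three nested loops, instantiated
theorem pv_foldA (l : List (String × List String)) (init : PySem.Dict String (List String)) :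
    l.foldl (fun d p => p.2.foldl (fun d i => d.modify i [] (· ++ [p.1])) d) init
      = (pvOccs l).foldl (fun d q => d.modify q.1 [] (· ++ [q.2])) init :=
  pv_foldl_nested (fun d q => d.modify q.1 [] (· ++ [q.2])) l init

theorem pv_foldC (l : List (String × List String)) (init : PySem.Dict String Int) :
    l.foldl (fun c p => p.2.foldl (fun c i => c.modify i 0 (· + 1)) c) init
      = (pvOccs l).foldl (fun c q => c.modify q.1 0 (· + 1)) init :=
  pv_foldl_nested (fun c q => c.modify q.1 0 (· + 1)) l init

theorem pv_foldB (C : PySem.Dict String Int) (l : List (String × List String))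
    (init : PySem.Dict String (List String)) :
    l.foldl (fun r p => p.2.foldl
        (fun r i => if 1 < C.getD i 0 then r.modify i [] (· ++ [p.1]) else r) r) init
      = (pvOccs l).foldl
          (fun r q => if 1 < C.getD q.1 0 then r.modify q.1 [] (· ++ [q.2]) else r) init :=
  pv_foldl_nested (fun r q => if 1 < C.getD q.1 0 then r.modify q.1 [] (· ++ [q.2]) else r) l init

-- counting keyed by the first component (key-projected form of getD_foldl_modify_add_one)
theorem pv_getD_count (os : List (String × String)) (d : PySem.Dict String Int) (i : String) :
    (os.foldl (fun c q => c.modify q.1 0 (· + 1)) d).getD i 0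
      = d.getD i 0 + ((os.map (·.1)).count i : Int) := by
  induction os generalizing d with
  | nil => simp
  | cons q t ih =>
      simp only [List.foldl_cons, ih, PySem.Dict.getD_modify, List.map_cons, List.count_cons]
      by_cases h : i = q.1
      · simp [h]; ring
      · simp [h, Ne.symm h]

-- the count dict of B looks up the total multiplicity of an id in the occurrence stream
theorem pv_counts_getD (l : List (String × List String)) (i : String) :
    (l.foldl (fun c p => p.2.foldl (fun c i => c.modify i 0 (· + 1)) c)
      (PySem.Dict.empty : PySem.Dict String Int)).getD i 0
      = (((pvOccs l).map (·.1)).count i : Int) := by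
  rw [pv_foldC]
  simpa using pv_getD_count (pvOccs l) PySem.Dict.empty i

-- the guarded rebuild loop of B is the grouping loop over the filtered stream
theorem pv_filter_fold (ks : List String) (os : List (String × String))
    (init : PySem.Dict String (List String)) :
    os.foldl (fun r q => if 1 < ks.count q.1 then r.modify q.1 [] (· ++ [q.2]) else r) init
      = (os.filter (fun q => decide (1 < ks.count q.1))).foldl
          (fun r q => r.modify q.1 [] (· ++ [q.2])) init := by
  induction os generalizing init with
  | nil => rfl
  | cons q t ih =>
      simp only [List.foldl_cons, List.filter_cons]
      by_cases h : 1 < ks.count q.1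
      · simp [h, ih]
      · simp [h, ih]

-- Set.ofList commutes with a filter
theorem pv_ofList_filter {α : Type} [BEq α] [LawfulBEq α] (p : α → Bool) (l : List α) :
    PySem.Set.ofList (l.filter p) = (PySem.Set.ofList l).filter p := by
  induction l using List.reverseRecOn with
  | nil => rfl
  | append_singleton t x ih =>
      rw [List.filter_append, PySem.Set.ofList_append_singleton]
      by_cases hx : p x = true
      · simp only [List.filter_cons, hx, if_pos, List.filter_nil,
          PySem.Set.ofList_append_singleton, ih]
        rw [PySem.Set.add_eq_ite, PySem.Set.add_eq_ite]
        by_cases hmem : x ∈ PySem.Set.ofList t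
        · simp [hmem, List.mem_filter.mpr ⟨hmem, hx⟩]
        · have : x ∉ (PySem.Set.ofList t).filter p := fun h => hmem (List.mem_filter.mp h).1
          simp [hmem, this, List.filter_append, hx]
      · simp only [List.filter_cons, hx]
        simp only [Bool.false_eq_true, if_neg, not_false_iff, List.filter_nil, List.append_nil, ih]
        rw [PySem.Set.add_eq_ite]
        by_cases hmem : x ∈ PySem.Set.ofList t
        · simp [hmem]
        · simp [hmem, List.filter_append, hx]

-- items of the grouping fold: first-occurrence keys paired with all their names, in order
theorem pv_group_items (os : List (String × String)) :
    (os.foldl (fun d q => d.modify q.1 [] (· ++ [q.2]))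
        (PySem.Dict.empty : PySem.Dict String (List String))).items
      = (PySem.Set.ofList (os.map (·.1))).map
          (fun k => (k, (os.filter (fun q => q.1 == k)).map (·.2))) := by
  have hnd : (os.foldl (fun d q => d.modify q.1 [] (· ++ [q.2]))
      (PySem.Dict.empty : PySem.Dict String (List String))).keys.Nodup := by
    exact PySem.Dict.nodup_keys_foldl_modify_key os (·.1) [] (fun d q => (· ++ [q.2]))
      PySem.Dict.empty (by simp)
  rw [PySem.Dict.items_eq_map_keys _ hnd []]
  have hkeys : (os.foldl (fun d q => d.modify q.1 [] (· ++ [q.2]))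
      (PySem.Dict.empty : PySem.Dict String (List String))).keys
      = PySem.Set.ofList (os.map (·.1)) := by
    rw [PySem.Dict.keys_foldl_modify_key os (·.1) [] (fun d q => (· ++ [q.2]))]
    simp [PySem.Dict.keys_empty, PySem.Set.update_nil_left]
  rw [hkeys]
  refine List.map_congr_left ?_
  intro k _
  simpa using PySem.Dict.getD_foldl_modify_append os PySem.Dict.empty k

theorem find_duplicate_ids_spec_aux (l : List (String × List String)) :
    find_duplicate_ids_across_datasets l = find_duplicate_ids_across_datasets_alt l := by
  unfold find_duplicate_ids_across_datasets find_duplicate_ids_across_datasets_alt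
  simp only
  rw [pv_foldA]
  have hcond : (fun (r : PySem.Dict String (List String)) (q : String × String) =>
      if 1 < (l.foldl (fun c p => p.2.foldl (fun c i => c.modify i 0 (· + 1)) c)
          (PySem.Dict.empty : PySem.Dict String Int)).getD q.1 0
      then r.modify q.1 [] (· ++ [q.2]) else r)
      = (fun r q => if 1 < ((pvOccs l).map (·.1)).count q.1
          then r.modify q.1 [] (· ++ [q.2]) else r) := by
    funext r q
    rw [pv_counts_getD l q.1]
    norm_cast
  rw [pv_foldB, hcond]
  rw [pv_filter_fold]
  rw [pv_group_items, pv_group_items]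
  -- abbreviations
  set os := pvOccs l with hos
  set ks := os.map (·.1) with hks
  -- count of a key equals the length of its grouped value list
  have hlen : ∀ k : String,
      ((os.filter (fun q => q.1 == k)).map (·.2)).length = ks.count k := by
    intro k
    rw [List.length_map, ← List.countP_eq_length_filter, hks, List.count_eq_countP, List.countP_map]
    rfl
  -- LHS filter over mapped items: push inside
  rw [List.filter_map]
  -- RHS: keys of the filtered stream
  have hmapf : (os.filter (fun q => decide (1 < ks.count q.1))).map (·.1)
      = ks.filter (fun x => decide (1 < ks.count x)) := by
    rw [hks, List.filter_map]
    rfl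
  rw [hmapf, pv_ofList_filter]
  -- both sides are maps over the same filtered key set
  have hpred : ((PySem.Set.ofList ks).filter
      (fun k => (1 < ((os.filter (fun q => q.1 == k)).map (·.2)).length : Bool)))
      = (PySem.Set.ofList ks).filter (fun x => decide (1 < ks.count x)) := by
    refine List.filter_congr ?_
    intro k _
    simp [hlen k]
  have hcomp : ((fun p : String × List String => decide (1 < p.2.length)) ∘
      (fun k => (k, (os.filter (fun q => q.1 == k)).map (·.2))))
      = fun k => decide (1 < ((os.filter (fun q => q.1 == k)).map (·.2)).length) := rfl
  rw [hcomp] at *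
  rw [show (fun k => decide (1 < ((os.filter (fun q => q.1 == k)).map (·.2)).length))
      = (fun x => decide (1 < ks.count x)) by funext k; simp [hlen k]]
  refine List.map_congr_left ?_
  intro k hk
  have hkcnt : 1 < ks.count k := by
    have := (List.mem_filter.mp hk).2
    simpa using this
  congr 1
  -- the grouped values of a surviving key are unchanged by the count filter
  rw [List.filter_filter]
  refine congrArg (List.map (fun x : String × String => x.2)) (List.filter_congr ?_)
  intro q _
  by_cases h : q.1 = k
  · subst h; simp [hkcnt]
  · simp [h]

-- ===== VERDICT (by name: the statement is the Claim_ definition above) =====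
theorem find_duplicate_ids_across_datasets_spec : Claim_equal_find_duplicate_ids_across_datasets := by
  intro l _
  unfold Spec_find_duplicate_ids_across_datasets
  exact find_duplicate_ids_spec_aux l
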